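-- pv_equiv track=rewrite | github.com/sanes135/PyPoint | Minecraft.py | group_points_by_frames
-- ===== SOURCE A (Python) =====
-- def group_points_by_frames(frames, start_index=1):
--     """
--     :return: Отсортированный список в формате [[point, [frame_indices]], ...]
--     """
--     point_frames_map = {}
--
--     for frame_idx, frame in enumerate(frames, start=start_index):
--         unique_points = set(frame)
--         for point in unique_points:
--             if point not in point_frames_map:
--                 point_frames_map[point] = []
--             point_frames_map[point].append(frame_idx)
--
--     result = []
--     for point, frames_list in point_frames_map.items():
--         result.append((point, tuple(sorted(frames_list))))
--
--     # Сортируем по точке (лексикографический порядок)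
--     result.sort(key=lambda x: x[0])
--
--     return result
-- ===== SOURCE B (Python) =====
-- def group_points_by_frames(frames, start_index=1):
--     """
--     :return: Отсортированный список в формате [[point, [frame_indices]], ...]
--     """
--     points = sorted({p for frame in frames for p in frame})
--     return [(p, tuple(i for i, frame in enumerate(frames, start=start_index) if p in frame))
--             for p in points]
-- ===== Notes on version B (the rewrite author's own statement) =====
-- stated objective: simpler
-- what changed: Replaces A's dict-of-lists accumulation (per-frame set iteration appending frame indices, then per-key sorting and a final sort of the items) by a direct two-liner: sort the distinct points once, then for each point collect the indices of the frames containing it with a single filtered enumerate pass; no dict and no per-key sort are needed.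
import Mathlib
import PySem

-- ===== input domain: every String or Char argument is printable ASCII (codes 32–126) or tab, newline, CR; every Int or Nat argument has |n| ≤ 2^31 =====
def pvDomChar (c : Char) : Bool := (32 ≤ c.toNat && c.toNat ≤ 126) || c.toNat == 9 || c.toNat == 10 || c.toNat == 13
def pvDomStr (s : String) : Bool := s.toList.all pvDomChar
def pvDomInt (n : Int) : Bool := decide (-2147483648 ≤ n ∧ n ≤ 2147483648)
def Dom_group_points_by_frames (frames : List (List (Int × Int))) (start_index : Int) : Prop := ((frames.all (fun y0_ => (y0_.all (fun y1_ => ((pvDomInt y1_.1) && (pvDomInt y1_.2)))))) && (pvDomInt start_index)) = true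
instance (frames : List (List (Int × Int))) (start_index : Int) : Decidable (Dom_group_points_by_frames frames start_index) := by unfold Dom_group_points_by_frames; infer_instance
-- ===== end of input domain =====

-- B replaces A's dict-of-lists accumulation by "sort the distinct points, then one filtered
-- enumerate pass per point" — a shorter, dict-free decomposition (objective: simpler).

-- ===== PORT A =====
def group_points_by_frames (frames : List (List (Int × Int))) (start_index : Int) : List ((Int × Int) × List Int) :=
  let point_frames_map : PySem.Dict (Int × Int) (List Int) :=
    (PySem.List.enumerate frames start_index).foldl
      (fun m fi =>
        (PySem.Set.ofList fi.2).foldl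
          (fun m point =>
            let m1 := if m.contains point then m else m.insert point []
            m1.insert point (m1.getD point [] ++ [fi.1])) m)
      (PySem.Dict.mk [])
  let result : List ((Int × Int) × List Int) :=
    point_frames_map.items.foldl
      (fun res pv => res ++ [(pv.1, PySem.List.sorted pv.2 (fun x => x))]) []
  PySem.List.sorted2 result (fun x => x.1.1) (fun x => x.1.2)

-- ===== PORT B =====
def group_points_by_frames_alt (frames : List (List (Int × Int))) (start_index : Int) : List ((Int × Int) × List Int) :=
  let points := PySem.List.sorted2 (PySem.Set.ofList (frames.flatMap (fun frame => frame))) (fun p => p.1) (fun p => p.2)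
  points.map (fun p =>
    (p, ((PySem.List.enumerate frames start_index).filter (fun ifr => ifr.2.contains p)).map (fun ifr => ifr.1)))

-- ===== PRECONDITION & SPEC =====
def Spec_group_points_by_frames (frames : List (List (Int × Int))) (start_index : Int) (out : List ((Int × Int) × List Int)) : Prop := out = group_points_by_frames_alt frames start_index
instance (frames : List (List (Int × Int))) (start_index : Int) (out : List ((Int × Int) × List Int)) : Decidable (Spec_group_points_by_frames frames start_index out) := by unfold Spec_group_points_by_frames; infer_instance

-- ===== CLAIM (what is proved, stated in full; the proofs are below) =====
def Claim_equal_group_points_by_frames : Prop := ∀ (frames : List (List (Int × Int))) (start_index : Int), Dom_group_points_by_frames frames start_index → Spec_group_points_by_frames frames start_index (group_points_by_frames frames start_index)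

-- ===== LEMMAS AND PROOFS =====
def pvStep (m : PySem.Dict (Int × Int) (List Int)) (pi : (Int × Int) × Int) : PySem.Dict (Int × Int) (List Int) :=
  let m1 := if m.contains pi.1 then m else m.insert pi.1 []
  m1.insert pi.1 (m1.getD pi.1 [] ++ [pi.2])

def pvG (q : List ((Int × Int) × Int)) (p : Int × Int) : List Int :=
  (q.filter (fun r => r.1 == p)).map (fun r => r.2)

-- find? (· == k) on a list containing k returns k
theorem pv_find?_beq {α : Type} [BEq α] [LawfulBEq α] (L : List α) (k : α) (h : k ∈ L) :
    L.find? (fun p => p == k) = some k := by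
  induction L with
  | nil => cases h
  | cons a t ih =>
    rcases List.mem_cons.mp h with rfl | ht
    · simp [List.find?]
    · by_cases ha : a == k
      · simp [List.find?, ha]; exact (eq_of_beq ha)
      · simp [List.find?, ha]; exact ih ht

theorem pv_find?_beq_none {α : Type} [BEq α] [LawfulBEq α] (L : List α) (k : α) (h : k ∉ L) :
    L.find? (fun p => p == k) = none := by
  apply List.find?_eq_none.mpr
  intro x hx
  simp only [beq_iff_eq]
  rintro rfl; exact h hx

theorem pv_contains_map (L : List (Int × Int)) (g : (Int × Int) → List Int) (k : Int × Int) :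
    (PySem.Dict.mk (L.map (fun p => (p, g p)))).contains k = decide (k ∈ L) := by
  simp only [PySem.Dict.contains]
  by_cases h : k ∈ L
  · rw [decide_eq_true h]
    apply List.any_eq_true.mpr
    exact ⟨(k, g k), List.mem_map_of_mem h, by simp⟩
  · rw [decide_eq_false h]
    apply List.any_eq_false.mpr
    intro pr hpr
    obtain ⟨p, hp, rfl⟩ := List.mem_map.mp hpr
    simp only [beq_iff_eq]
    rintro rfl; exact h hp

theorem pv_get?_map (L : List (Int × Int)) (g : (Int × Int) → List Int) (k : Int × Int) (h : k ∈ L) :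
    (PySem.Dict.mk (L.map (fun p => (p, g p)))).get? k = some (g k) := by
  simp only [PySem.Dict.get?, List.find?_map]
  rw [show ((fun (pr : (Int × Int) × List Int) => pr.1 == k) ∘ (fun p => (p, g p))) = (fun p => p == k) from rfl]
  rw [pv_find?_beq L k h]
  rfl



theorem pv_ofList_append_singleton {α : Type} [BEq α] (l : List α) (x : α) :
    PySem.Set.ofList (l ++ [x]) = PySem.Set.add (PySem.Set.ofList l) x := by
  simp only [PySem.Set.ofList, List.foldl_append, List.foldl_cons, List.foldl_nil]

theorem pv_filter_beq_nil (q : List ((Int × Int) × Int)) (k : Int × Int)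
    (h : k ∉ q.map (fun r => r.1)) : q.filter (fun r => r.1 == k) = [] := by
  apply List.filter_eq_nil_iff.mpr
  intro r hr
  simp only [beq_iff_eq]
  intro he
  exact h (he ▸ List.mem_map_of_mem hr)

theorem pv_pvG_append (q : List ((Int × Int) × Int)) (x : (Int × Int) × Int) (p : Int × Int) :
    pvG (q ++ [x]) p = pvG q p ++ (if x.1 = p then [x.2] else []) := by
  unfold pvG
  rw [List.filter_append, List.map_append]
  congr 1
  by_cases h : x.1 = p
  · rw [if_pos h]
    subst h
    rw [List.filter_cons_of_pos (by simp), List.filter_nil]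
    rfl
  · rw [if_neg h, List.filter_cons_of_neg (by simpa using h), List.filter_nil]
    rfl

theorem pv_step_mk_mem (S : List (Int × Int)) (G : (Int × Int) → List Int) (x : (Int × Int) × Int)
    (hx : x.1 ∈ S) :
    pvStep (PySem.Dict.mk (S.map (fun p => (p, G p)))) x
      = PySem.Dict.mk (S.map (fun p => (p, if p = x.1 then G x.1 ++ [x.2] else G p))) := by
  unfold pvStep
  rw [pv_contains_map S G x.1, decide_eq_true hx, if_pos rfl]
  simp only [PySem.Dict.getD, pv_get?_map S G x.1 hx, Option.getD_some]
  simp only [PySem.Dict.insert, pv_contains_map S G x.1, decide_eq_true hx]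
  rw [if_pos trivial]
  congr 1
  rw [List.map_map]
  apply List.map_congr_left
  intro p _
  by_cases hp : p = x.1
  · subst hp; simp
  · simp [Function.comp, hp]

theorem pv_step_mk_not_mem (S : List (Int × Int)) (G : (Int × Int) → List Int) (x : (Int × Int) × Int)
    (hx : x.1 ∉ S) :
    pvStep (PySem.Dict.mk (S.map (fun p => (p, G p)))) x
      = PySem.Dict.mk (S.map (fun p => (p, G p)) ++ [(x.1, [x.2])]) := by
  unfold pvStep
  rw [pv_contains_map S G x.1, decide_eq_false hx, if_neg (by simp)]
  have hins : (PySem.Dict.mk (S.map (fun p => (p, G p)))).insert x.1 []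
      = PySem.Dict.mk (S.map (fun p => (p, G p)) ++ [(x.1, ([] : List Int))]) := by
    simp only [PySem.Dict.insert, pv_contains_map S G x.1, decide_eq_false hx]
    rw [if_neg (by simp)]
  rw [hins]
  show (PySem.Dict.mk (S.map (fun p => (p, G p)) ++ [(x.1, ([] : List Int))])).insert x.1
      ((PySem.Dict.mk (S.map (fun p => (p, G p)) ++ [(x.1, ([] : List Int))])).getD x.1 [] ++ [x.2])
    = PySem.Dict.mk (S.map (fun p => (p, G p)) ++ [(x.1, [x.2])])
  have hget : (PySem.Dict.mk (S.map (fun p => (p, G p)) ++ [(x.1, ([] : List Int))])).getD x.1 []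
      = ([] : List Int) := by
    simp only [PySem.Dict.getD, PySem.Dict.get?]
    rw [List.find?_append]
    rw [List.find?_map]
    rw [show ((fun (pr : (Int × Int) × List Int) => pr.1 == x.1) ∘ (fun p => (p, G p))) = (fun p => p == x.1) from rfl]
    rw [pv_find?_beq_none S x.1 hx]
    simp [List.find?]
  rw [hget]
  have hcon : (PySem.Dict.mk (S.map (fun p => (p, G p)) ++ [(x.1, ([] : List Int))])).contains x.1 = true := by
    simp only [PySem.Dict.contains]
    apply List.any_eq_true.mpr
    exact ⟨(x.1, []), by simp, by simp⟩
  simp only [PySem.Dict.insert, hcon]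
  rw [if_pos trivial]
  congr 1
  rw [List.map_append]
  congr 1
  · rw [List.map_map]
    apply List.map_congr_left
    intro p hp
    have hne : ¬ ((p, G p).1 == x.1) = true := by
      simp only [beq_iff_eq]
      rintro rfl; exact hx hp
    show (if ((p, G p).1 == x.1) = true then (x.1, [] ++ [x.2]) else (p, G p)) = (p, G p)
    rw [if_neg hne]
  · simp

theorem pv_set_add_of_mem {α : Type} [BEq α] [LawfulBEq α] (S : List α) (x : α) (h : x ∈ S) :
    PySem.Set.add S x = S := by
  simp [PySem.Set.add, h]

theorem pv_set_add_of_not_mem {α : Type} [BEq α] [LawfulBEq α] (S : List α) (x : α) (h : x ∉ S) :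
    PySem.Set.add S x = S ++ [x] := by
  simp [PySem.Set.add, h]

theorem pv_dict_char (q : List ((Int × Int) × Int)) :
    (q.foldl pvStep (PySem.Dict.mk [])).items
      = (PySem.Set.ofList (q.map (fun r => r.1))).map (fun p => (p, pvG q p)) := by
  induction q using List.reverseRecOn with
  | nil => rfl
  | append_singleton q x ih =>
    rw [List.foldl_append, List.foldl_cons, List.foldl_nil]
    have hd : q.foldl pvStep (PySem.Dict.mk [])
        = PySem.Dict.mk ((PySem.Set.ofList (q.map (fun r => r.1))).map (fun p => (p, pvG q p))) := by
      have := congrArg PySem.Dict.mk ih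
      exact this
    rw [hd, List.map_append]
    simp only [List.map_cons, List.map_nil]
    rw [pv_ofList_append_singleton]
    by_cases hx : x.1 ∈ PySem.Set.ofList (q.map (fun r => r.1))
    · rw [pv_step_mk_mem _ _ _ hx, pv_set_add_of_mem _ _ hx]
      show List.map _ _ = _
      apply List.map_congr_left
      intro p _
      rw [pv_pvG_append]
      by_cases hp : p = x.1
      · subst hp
        rw [if_pos rfl, if_pos rfl]
      · rw [if_neg hp, if_neg (fun he => hp he.symm), List.append_nil]
    · rw [pv_step_mk_not_mem _ _ _ hx, pv_set_add_of_not_mem _ _ hx]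
      show List.map (fun p => (p, pvG q p)) _ ++ _ = _
      rw [List.map_append]
      have hxq : x.1 ∉ q.map (fun r => r.1) := fun h => hx ((PySem.Set.mem_ofList _ _).mpr h)
      congr 1
      · apply List.map_congr_left
        intro p hp
        have hpx : ¬ x.1 = p := by
          rintro rfl
          exact hx hp
        rw [pv_pvG_append, if_neg hpx, List.append_nil]
      · simp only [List.map_cons, List.map_nil]
        rw [pv_pvG_append, if_pos rfl]
        unfold pvG
        rw [pv_filter_beq_nil q x.1 hxq]
        rfl

theorem pv_sorted2_eq_sorted_lex {α : Type} (xs : List α) (k1 k2 : α → Int) :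
    PySem.List.sorted2 xs k1 k2 = PySem.List.sorted xs (fun x => (toLex (k1 x, k2 x) : Lex (Int × Int))) := by
  rw [PySem.List.sorted_eq_foldl_insertBy]
  unfold PySem.List.sorted2
  simp only [if_neg (by decide : ¬ (false = true))]
  congr 1
  funext acc x
  congr 1
  funext a b
  simp only [Prod.Lex.lt_iff]
  by_cases h : k1 a < k1 b <;> by_cases h2 : k1 b < k1 a <;> by_cases h3 : k2 a < k2 b <;>
    simp [h, h2, h3] <;> omega

theorem pv_filter_beq_self {α : Type} [BEq α] [LawfulBEq α] (L : List α) (p : α) (hnd : L.Nodup) :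
    L.filter (fun a => a == p) = if p ∈ L then [p] else [] := by
  induction L with
  | nil => simp
  | cons a t ih =>
    rcases List.nodup_cons.mp hnd with ⟨ha, hnd'⟩
    by_cases hap : a = p
    · subst hap
      rw [List.filter_cons_of_pos (by simp), if_pos List.mem_cons_self, ih hnd', if_neg ha]
    · rw [List.filter_cons_of_neg (by simpa using hap), ih hnd']
      by_cases hp : p ∈ t
      · rw [if_pos hp, if_pos (List.mem_cons_of_mem _ hp)]
      · rw [if_neg hp, if_neg (by
          intro h
          rcases List.mem_cons.mp h with h1 | h2
          · exact hap h1.symm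
          · exact hp h2)]

def pvOcc (frames : List (List (Int × Int))) (start_index : Int) (p : Int × Int) : List Int :=
  ((PySem.List.enumerate frames start_index).filter (fun ifr => ifr.2.contains p)).map (fun ifr => ifr.1)

theorem pv_pvG_app (l1 l2 : List ((Int × Int) × Int)) (p : Int × Int) :
    pvG (l1 ++ l2) p = pvG l1 p ++ pvG l2 p := by
  unfold pvG
  rw [List.filter_append, List.map_append]

theorem pv_pvG_flat (e : List (Int × List (Int × Int))) (p : Int × Int) :
    pvG (e.flatMap (fun fi => (PySem.Set.ofList fi.2).map (fun q => (q, fi.1)))) p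
      = (e.filter (fun ifr => ifr.2.contains p)).map (fun ifr => ifr.1) := by
  induction e with
  | nil => rfl
  | cons fi t ih =>
    rw [List.flatMap_cons, pv_pvG_app, ih]
    have hhead : pvG ((PySem.Set.ofList fi.2).map (fun q => (q, fi.1))) p
        = if fi.2.contains p then [fi.1] else [] := by
      unfold pvG
      rw [List.filter_map]
      rw [show ((fun (r : (Int × Int) × Int) => r.1 == p) ∘ (fun q => (q, fi.1))) = (fun q => q == p) from rfl]
      rw [pv_filter_beq_self _ _ (PySem.Set.nodup_ofList fi.2)]
      by_cases hp : p ∈ fi.2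
      · rw [if_pos ((PySem.Set.mem_ofList _ _).mpr hp),
            if_pos (List.contains_iff_mem.mpr hp)]
        rfl
      · rw [if_neg (fun h => hp ((PySem.Set.mem_ofList _ _).mp h)),
            if_neg (fun h => hp (List.contains_iff_mem.mp h))]
        rfl
    rw [hhead]
    by_cases hc : fi.2.contains p
    · rw [if_pos hc, List.filter_cons_of_pos (by exact hc), List.map_cons]
      rfl
    · rw [if_neg hc, List.filter_cons_of_neg (by exact (by simpa using hc)), List.nil_append]

theorem pv_occ_pairwise (frames : List (List (Int × Int))) (s : Int) (p : Int × Int) :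
    (pvOcc frames s p).Pairwise (fun a b => a < b) := by
  unfold pvOcc
  apply List.pairwise_map.mpr
  exact (PySem.List.pairwise_lt_enumerate frames s).filter _

def pvPairsD (frames : List (List (Int × Int))) (start_index : Int) : List ((Int × Int) × Int) :=
  (PySem.List.enumerate frames start_index).flatMap
    (fun fi => (PySem.Set.ofList fi.2).map (fun p => (p, fi.1)))

theorem pv_mem_pairs_fst (frames : List (List (Int × Int))) (s : Int) (a : Int × Int) :
    a ∈ (pvPairsD frames s).map (fun r => r.1) ↔ a ∈ frames.flatMap (fun fr => fr) := by
  unfold pvPairsD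
  simp only [List.mem_map, List.mem_flatMap, PySem.Set.mem_ofList, PySem.List.mem_enumerate_iff]
  constructor
  · rintro ⟨r, ⟨fi, ⟨k, hk, rfl⟩, ⟨q, hq, rfl⟩⟩, rfl⟩
    exact ⟨frames[k], List.getElem_mem hk, hq⟩
  · rintro ⟨fr, hfr, ha⟩
    obtain ⟨k, hk, rfl⟩ := List.mem_iff_getElem.mp hfr
    exact ⟨(a, s + k), ⟨(s + k, frames[k]), ⟨k, hk, rfl⟩, ⟨a, ha, rfl⟩⟩, rfl⟩

theorem pv_A_flat (frames : List (List (Int × Int))) (s : Int) (d : PySem.Dict (Int × Int) (List Int)) :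
    (PySem.List.enumerate frames s).foldl
      (fun m fi => (PySem.Set.ofList fi.2).foldl
        (fun m point =>
          let m1 := if m.contains point then m else m.insert point []
          m1.insert point (m1.getD point [] ++ [fi.1])) m) d
    = (pvPairsD frames s).foldl pvStep d := by
  unfold pvPairsD
  rw [List.foldl_flatMap]
  congr 1
  funext m fi
  rw [List.foldl_map]
  rfl

theorem pv_main (frames : List (List (Int × Int))) (s : Int) :
    group_points_by_frames frames s = group_points_by_frames_alt frames s := by
  have h1 : group_points_by_frames frames s
      = PySem.List.sorted2
          (((PySem.Set.ofList ((pvPairsD frames s).map (fun r => r.1))).map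
              (fun p => (p, pvG (pvPairsD frames s) p))).foldl
            (fun res pv => res ++ [(pv.1, PySem.List.sorted pv.2 (fun x => x))]) [])
          (fun x => x.1.1) (fun x => x.1.2) := by
    show PySem.List.sorted2
        ((((PySem.List.enumerate frames s).foldl
            (fun m fi => (PySem.Set.ofList fi.2).foldl
              (fun m point =>
                let m1 := if m.contains point then m else m.insert point []
                m1.insert point (m1.getD point [] ++ [fi.1])) m)
            (PySem.Dict.mk [])).items).foldl
          (fun res pv => res ++ [(pv.1, PySem.List.sorted pv.2 (fun x => x))]) [])
        (fun x => x.1.1) (fun x => x.1.2) = _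
    rw [pv_A_flat, pv_dict_char]
  have h2 : group_points_by_frames frames s
      = PySem.List.sorted2
          ((PySem.Set.ofList ((pvPairsD frames s).map (fun r => r.1))).map
              (fun p => (p, pvOcc frames s p)))
          (fun x => x.1.1) (fun x => x.1.2) := by
    rw [h1, PySem.List.foldl_append_singleton_eq_map, List.nil_append, List.map_map]
    congr 1
    apply List.map_congr_left
    intro p _
    show (p, PySem.List.sorted (pvG (pvPairsD frames s) p) (fun x => x)) = (p, pvOcc frames s p)
    have hocc : pvG (pvPairsD frames s) p = pvOcc frames s p := pv_pvG_flat _ _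
    rw [hocc, PySem.List.sorted_eq_self_of_pairwise _ _
      ((pv_occ_pairwise frames s p).imp (fun h => le_of_lt h))]
  have hB : group_points_by_frames_alt frames s
      = (PySem.List.sorted (PySem.Set.ofList (frames.flatMap (fun fr => fr)))
          (fun p => (toLex p : Lex (Int × Int)))).map
          (fun p => (p, pvOcc frames s p)) := by
    unfold group_points_by_frames_alt
    rw [pv_sorted2_eq_sorted_lex]
    rfl
  rw [h2, hB, pv_sorted2_eq_sorted_lex]
  have hnd0 : (PySem.Set.ofList (frames.flatMap (fun fr => fr))).Nodup :=
    PySem.Set.nodup_ofList _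
  have hndS : (PySem.Set.ofList ((pvPairsD frames s).map (fun r => r.1))).Nodup :=
    PySem.Set.nodup_ofList _
  have hperm0 : (PySem.List.sorted (PySem.Set.ofList (frames.flatMap (fun fr => fr)))
      (fun p => (toLex p : Lex (Int × Int)))).Perm
      (PySem.Set.ofList ((pvPairsD frames s).map (fun r => r.1))) := by
    refine (PySem.List.sorted_perm _ _ _).trans ?_
    refine (List.perm_ext_iff_of_nodup hnd0 hndS).mpr ?_
    intro a
    rw [PySem.Set.mem_ofList, PySem.Set.mem_ofList, pv_mem_pairs_fst]
  have hsortnd : (PySem.List.sorted (PySem.Set.ofList (frames.flatMap (fun fr => fr)))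
      (fun p => (toLex p : Lex (Int × Int)))).Nodup := hperm0.symm.nodup hndS
  have hpl : (PySem.List.sorted (PySem.Set.ofList (frames.flatMap (fun fr => fr)))
      (fun p => (toLex p : Lex (Int × Int)))).Pairwise
      (fun a b => (toLex a : Lex (Int × Int)) < toLex b) := by
    have hle := PySem.List.sorted_pairwise (PySem.Set.ofList (frames.flatMap (fun fr => fr)))
      (fun p => (toLex p : Lex (Int × Int)))
    exact (hle.and hsortnd).imp (fun h => lt_of_le_of_ne h.1 (fun he => h.2 (toLex.injective he)))
  exact PySem.List.sorted_eq_of_perm_of_pairwise_lt _ _ _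
    (hperm0.map _) (List.pairwise_map.mpr hpl)

-- ===== VERDICT (by name: the statement is the Claim_ definition above) =====
theorem group_points_by_frames_spec : Claim_equal_group_points_by_frames := by
  intro frames start_index _
  unfold Spec_group_points_by_frames
  exact pv_main frames start_index
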